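-- pv_equiv track=rewrite | github.com/SimonJolibois/Pic2Anki | main.py | find_sentence
-- ===== SOURCE A (Python) =====
-- def find_sentence(t_list, w_list):
--     """Find for each word of w_list a sentence of t_list containing it"""
--     sentence_list = [0]*len(w_list)
--     for i, w in enumerate(w_list):
--         for j in range(len(t_list)):
--             if w in t_list[j]:
--                 sentence_list[i] = j
--                 break
--     return sentence_list
-- ===== SOURCE B (Python) =====
-- def find_sentence(t_list, w_list):
--     """Find for each word of w_list a sentence of t_list containing it.
--
--     One sentence-major pass: scan the sentences once, keeping the set of
--     still-unmatched words; record the sentence index the first time each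
--     word matches, and stop early once every word is matched.
--     """
--     res = {}
--     pending = list(enumerate(w_list))
--     for j, s in enumerate(t_list):
--         for i, _w in [(i, w) for (i, w) in pending if w in s]:
--             res[i] = j
--         pending = [(i, w) for (i, w) in pending if w not in s]
--         if not pending:
--             break
--     return [res.get(i, 0) for i in range(len(w_list))]
-- ===== Notes on version B (the rewrite author's own statement) =====
-- stated objective: alternative
-- what changed: Replaced A's word-major nested scan (for each word, rescan the sentences from the start) by a single sentence-major pass that keeps the set of still-unmatched words, records the sentence index at a word's first match, and stops early once every word is matched.
import Mathlib
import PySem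

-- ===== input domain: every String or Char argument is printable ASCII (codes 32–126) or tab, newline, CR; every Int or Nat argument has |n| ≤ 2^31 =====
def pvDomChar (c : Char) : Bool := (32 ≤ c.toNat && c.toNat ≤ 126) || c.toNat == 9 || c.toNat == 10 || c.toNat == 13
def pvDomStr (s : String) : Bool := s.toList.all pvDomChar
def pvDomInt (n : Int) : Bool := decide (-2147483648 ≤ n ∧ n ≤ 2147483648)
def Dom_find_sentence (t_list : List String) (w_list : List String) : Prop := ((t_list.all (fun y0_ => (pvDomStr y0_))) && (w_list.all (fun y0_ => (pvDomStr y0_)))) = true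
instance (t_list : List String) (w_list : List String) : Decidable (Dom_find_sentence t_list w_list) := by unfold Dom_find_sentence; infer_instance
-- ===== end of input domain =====

-- B replaces A's word-major nested scan by one sentence-major pass over t_list that keeps
-- the still-unmatched words and stops early once all are matched (objective: alternative).

-- ===== PORT A =====
-- inner 'for j in range(len(t_list)): if w in t_list[j]: sentence_list[i] = j; break'
-- (j drawn from range(len(t_list)) is always a valid index, so pyGetD's default is never used;
--  i is a nonnegative enumerate index, so .toNat is exact)
def pvInnerA (t_list : List String) (w : String) (i : Int) (sl : List Int) : List Int → List Int
  | [] => sl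
  | j :: js =>
    if PySem.Str.isIn w (PySem.List.pyGetD t_list j "") then sl.set i.toNat j
    else pvInnerA t_list w i sl js

def find_sentence (t_list : List String) (w_list : List String) : List Int :=
  let sentence_list := List.replicate w_list.length (0 : Int)
  (PySem.List.enumerate w_list 0).foldl
    (fun sl iw => pvInnerA t_list iw.2 iw.1 sl (PySem.List.pyRange 0 (PySem.List.len t_list) 1))
    sentence_list

-- ===== PORT B =====
-- one pass over the sentences: record j for every still-pending word contained in the
-- current sentence, drop those words from pending, stop early when pending is empty
def pvScanB (j : Int) (pending : List (Int × String)) (res : PySem.Dict Int Int) :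
    List String → PySem.Dict Int Int
  | [] => res
  | s :: rest =>
    let found := pending.filter (fun iw => PySem.Str.isIn iw.2 s)
    let res' := found.foldl (fun r iw => r.insert iw.1 j) res
    let pending' := pending.filter (fun iw => !(PySem.Str.isIn iw.2 s))
    if pending'.isEmpty then res' else pvScanB (j + 1) pending' res' rest

def find_sentence_alt (t_list : List String) (w_list : List String) : List Int :=
  let res := pvScanB 0 (PySem.List.enumerate w_list 0) PySem.Dict.empty t_list
  (PySem.List.pyRange 0 (PySem.List.len w_list) 1).map (fun i => res.getD i 0)

-- ===== PRECONDITION & SPEC =====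
def Spec_find_sentence (t_list : List String) (w_list : List String) (out : List Int) : Prop := out = find_sentence_alt t_list w_list
instance (t_list : List String) (w_list : List String) (out : List Int) : Decidable (Spec_find_sentence t_list w_list out) := by unfold Spec_find_sentence; infer_instance

-- ===== CLAIM (what is proved, stated in full; the proofs are below) =====
def Claim_equal_find_sentence : Prop := ∀ (t_list : List String) (w_list : List String), Dom_find_sentence t_list w_list → Spec_find_sentence t_list w_list (find_sentence t_list w_list)

-- ===== LEMMAS AND PROOFS =====

-- reference value: index of the first sentence containing w, else 0
def pvSpecIdx (t_list : List String) (w : String) : Int :=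
  match t_list.findIdx? (fun s => PySem.Str.isIn w s) with
  | some k => (k : Int)
  | none => 0

-- A's inner loop computes the first matching index (from position a on) and writes it
theorem pvInnerA_spec (t_list : List String) (w : String) (i : Int) (sl : List Int)
    (a : Nat) (h : a ≤ t_list.length) :
    pvInnerA t_list w i sl (PySem.List.pyRange (a : Int) (t_list.length : Int) 1) =
      match (t_list.drop a).findIdx? (fun s => PySem.Str.isIn w s) with
      | some k => sl.set i.toNat ((a + k : Nat) : Int)
      | none => sl := by
  induction hn : t_list.length - a generalizing a with
  | zero =>
    have ha : a = t_list.length := by omega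
    rw [PySem.List.pyRange_one_eq_nil (by exact_mod_cast le_of_eq ha.symm)]
    simp [pvInnerA, ha]
  | succ n ih =>
    have hlt : a < t_list.length := by omega
    rw [PySem.List.pyRange_one_cons (by exact_mod_cast hlt)]
    have hdrop : t_list.drop a = t_list[a] :: t_list.drop (a + 1) :=
      (List.getElem_cons_drop hlt).symm
    have hget : PySem.List.pyGetD t_list (a : Int) "" = t_list[a] := by
      rw [PySem.List.pyGetD_natCast]
      exact List.getD_eq_getElem _ _ hlt
    by_cases hin : PySem.Str.isIn w t_list[a] = true
    · simp only [pvInnerA, hget, hin, reduceIte]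
      rw [hdrop, List.findIdx?_cons, if_pos hin]
      norm_num
    · have hrec : pvInnerA t_list w i sl (PySem.List.pyRange ((a : Int) + 1) (t_list.length : Int) 1)
          = pvInnerA t_list w i sl (PySem.List.pyRange ((a + 1 : Nat) : Int) (t_list.length : Int) 1) := by
        norm_num
      have ih' := ih (a + 1) (by omega) (by omega)
      simp only [pvInnerA, hget, hin, Bool.false_eq_true, reduceIte, hrec, ih']
      rw [hdrop, List.findIdx?_cons, if_neg hin]
      cases hfi : (t_list.drop (a + 1)).findIdx? (fun s => PySem.Str.isIn w s) with
      | none => simp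
      | some k =>
        simp only [Option.map_some]
        congr 2
        omega

-- A's outer loop fills in the reference value word by word
theorem pvOuterA (t_list : List String) (ws : List String) (done : List Int) :
    (PySem.List.enumerate ws ((done.length : Nat) : Int)).foldl
      (fun sl iw => pvInnerA t_list iw.2 iw.1 sl (PySem.List.pyRange 0 (PySem.List.len t_list) 1))
      (done ++ List.replicate ws.length 0)
    = done ++ ws.map (pvSpecIdx t_list) := by
  induction ws generalizing done with
  | nil => simp [PySem.List.enumerate_nil]
  | cons w ws ih =>
    rw [PySem.List.enumerate_cons, List.foldl_cons]
    have hinner := pvInnerA_spec t_list w ((done.length : Nat) : Int)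
      (done ++ List.replicate (w :: ws).length 0) 0 (Nat.zero_le _)
    rw [List.drop_zero] at hinner
    have hlen : PySem.List.pyRange 0 (PySem.List.len t_list) 1
        = PySem.List.pyRange ((0 : Nat) : Int) ((t_list.length : Nat) : Int) 1 := by
      simp [PySem.List.len_eq]
    have hstep :
        pvInnerA t_list w ((done.length : Nat) : Int)
            (done ++ List.replicate (w :: ws).length 0)
            (PySem.List.pyRange 0 (PySem.List.len t_list) 1)
          = (done ++ [pvSpecIdx t_list w]) ++ List.replicate ws.length 0 := by
      rw [hlen]
      rw [show ((0 : Nat) : Int) = (0 : Int) by norm_num] at hinner ⊢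
      rw [hinner]
      unfold pvSpecIdx
      cases hfi : t_list.findIdx? (fun s => PySem.Str.isIn w s) with
      | none =>
        simp [List.replicate_succ]
      | some k =>
        simp [List.replicate_succ, Int.toNat_natCast]
    rw [hstep]
    have harith : (done.length : Int) + 1 = (((done ++ [pvSpecIdx t_list w]).length : Nat) : Int) := by
      simp
    rw [harith, ih]
    simp

-- A equals the reference map
theorem find_sentence_eq_map (t_list : List String) (w_list : List String) :
    find_sentence t_list w_list = w_list.map (pvSpecIdx t_list) := by
  have h := pvOuterA t_list w_list []
  simpa [find_sentence] using h

-- a fold of inserts under the same value j: lookup of an untouched key is unchanged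
theorem pvGet?_foldl_insert_of_not_mem (l : List (Int × String)) (j : Int)
    (d : PySem.Dict Int Int) (i : Int) (h : ∀ p ∈ l, p.1 ≠ i) :
    (l.foldl (fun r iw => r.insert iw.1 j) d).get? i = d.get? i := by
  induction l generalizing d with
  | nil => rfl
  | cons p l ihl =>
    rw [List.foldl_cons, ihl _ (fun q hq => h q (List.mem_cons_of_mem _ hq))]
    exact PySem.Dict.get?_insert_of_ne d j (Ne.symm (h p List.mem_cons_self))

-- a fold of inserts under the same value j: lookup of an inserted key gives j
theorem pvGet?_foldl_insert_of_mem (l : List (Int × String)) (j : Int)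
    (d : PySem.Dict Int Int) (i : Int) (h : i ∈ l.map Prod.fst) :
    (l.foldl (fun r iw => r.insert iw.1 j) d).get? i = some j := by
  induction l generalizing d with
  | nil => simp at h
  | cons p l ihl =>
    rw [List.foldl_cons]
    by_cases hmem : i ∈ l.map Prod.fst
    · exact ihl _ hmem
    · have hpi : p.1 = i := by
        rcases List.mem_map.mp h with ⟨q, hq, hqi⟩
        rcases List.mem_cons.mp hq with hq | hq
        · rw [hq] at hqi; exact hqi
        · exact absurd (List.mem_map.mpr ⟨q, hq, hqi⟩) hmem
      rw [pvGet?_foldl_insert_of_not_mem _ _ _ _ (fun q hq hqi =>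
        hmem (List.mem_map.mpr ⟨q, hq, hqi⟩))]
      rw [hpi]
      exact PySem.Dict.get?_insert_self d i j

-- find? by key returns the unique entry with that key
theorem pvFind?_key_unique (l : List (Int × String)) (i : Int) (p : Int × String)
    (hp : p ∈ l) (hkey : p.1 = i) (huniq : ∀ q ∈ l, q.1 = i → q = p) :
    l.find? (fun q => q.1 == i) = some p := by
  induction l with
  | nil => simp at hp
  | cons x l ihl =>
    rw [List.find?_cons]
    by_cases hx : x.1 = i
    · have hxp : x = p := huniq x List.mem_cons_self hx
      simp [hxp, hkey]
    · have hne : (x.1 == i) = false := beq_eq_false_iff_ne.mpr hx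
      rw [hne]
      rcases List.mem_cons.mp hp with h | h
      · exact absurd (h ▸ hkey) hx
      · exact ihl h (fun q hq => huniq q (List.mem_cons_of_mem _ hq))

-- B's dict lookup after the scan
theorem pvScanB_get? (t_list : List String) (j : Int) (pending : List (Int × String))
    (res : PySem.Dict Int Int) (i : Int) (hk : (pending.map Prod.fst).Nodup) :
    (pvScanB j pending res t_list).get? i =
      match pending.find? (fun p => p.1 == i) with
      | some p =>
        match t_list.findIdx? (fun s => PySem.Str.isIn p.2 s) with
        | some k => some (j + k)
        | none => res.get? i
      | none => res.get? i := by
  induction t_list generalizing j pending res with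
  | nil =>
    simp only [pvScanB]
    cases hf : pending.find? (fun p => p.1 == i) with
    | none => rfl
    | some p => simp [List.findIdx?_nil]
  | cons s rest ihr =>
    simp only [pvScanB]
    set found := pending.filter (fun iw => PySem.Str.isIn iw.2 s) with hfound
    set res' := found.foldl (fun r iw => r.insert iw.1 j) res with hres'
    set pending' := pending.filter (fun iw => !PySem.Str.isIn iw.2 s) with hpending'
    have hk' : (pending'.map Prod.fst).Nodup :=
      (List.Sublist.map Prod.fst List.filter_sublist).nodup hk
    cases hf : pending.find? (fun p => p.1 == i) with
    | none =>
      have hnok : ∀ q ∈ pending, q.1 ≠ i := by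
        intro q hq hqi
        have := List.find?_eq_none.mp hf q hq
        simp [hqi] at this
      have hres'i : res'.get? i = res.get? i :=
        pvGet?_foldl_insert_of_not_mem _ _ _ _
          (fun q hq => hnok q (List.mem_of_mem_filter hq))
      have hf' : pending'.find? (fun p => p.1 == i) = none :=
        List.find?_eq_none.mpr (fun q hq => by
          simpa using hnok q (List.mem_of_mem_filter hq))
      dsimp only
      by_cases hemp : pending'.isEmpty = true
      · rw [if_pos hemp, hres'i]
      · rw [if_neg hemp, ihr (j + 1) pending' res' hk', hf']
        exact hres'i
    | some p =>
      have hpmem : p ∈ pending := List.mem_of_find?_eq_some hf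
      have hpkey : p.1 = i := by
        have := List.find?_some hf
        simpa using this
      have huniq : ∀ q ∈ pending, q.1 = i → q = p :=
        fun q hq hqi => List.inj_on_of_nodup_map hk hq hpmem (by rw [hqi, hpkey])
      by_cases hin : PySem.Str.isIn p.2 s = true
      · -- p matches this sentence: recorded now with index j
        have hpfound : p ∈ found := List.mem_filter.mpr ⟨hpmem, hin⟩
        have hres'i : res'.get? i = some j :=
          pvGet?_foldl_insert_of_mem _ _ _ _
            (List.mem_map.mpr ⟨p, hpfound, hpkey⟩)
        have hf' : pending'.find? (fun p => p.1 == i) = none :=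
          List.find?_eq_none.mpr (fun q hq => by
            have hqp := List.mem_filter.mp hq
            by_contra hcon
            have hqi : q.1 = i := by simpa using hcon
            have hqe : q = p := huniq q hqp.1 hqi
            rw [hqe, hin] at hqp
            simpa using hqp.2)
        dsimp only
        rw [List.findIdx?_cons, if_pos hin]
        dsimp only
        by_cases hemp : pending'.isEmpty = true
        · rw [if_pos hemp, hres'i]
          norm_num
        · rw [if_neg hemp, ihr (j + 1) pending' res' hk', hf', hres'i]
          norm_num
      · -- p not matched here: it stays pending, shifted to the remaining sentences
        have hinf : PySem.Str.isIn p.2 s = false := eq_false_of_ne_true hin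
        have hppend' : p ∈ pending' := List.mem_filter.mpr ⟨hpmem, by rw [hinf]; rfl⟩
        have hemp : ¬ pending'.isEmpty = true := by
          have hne : pending' ≠ [] := List.ne_nil_of_mem hppend'
          simp [List.isEmpty_iff, hne]
        have hf' : pending'.find? (fun q => q.1 == i) = some p :=
          pvFind?_key_unique _ _ _ hppend' hpkey
            (fun q hq => huniq q (List.mem_of_mem_filter hq))
        have hres'i : res'.get? i = res.get? i :=
          pvGet?_foldl_insert_of_not_mem _ _ _ _ (fun q hq hqi => by
            have hqp := List.mem_filter.mp hq
            have hqe : q = p := huniq q hqp.1 hqi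
            have hq2 : PySem.Str.isIn q.2 s = true := hqp.2
            rw [hqe, hinf] at hq2
            exact Bool.false_ne_true hq2)
        dsimp only
        rw [if_neg hemp, ihr (j + 1) pending' res' hk', hf']
        dsimp only
        rw [List.findIdx?_cons, if_neg hin]
        cases hfi : rest.findIdx? (fun s => PySem.Str.isIn p.2 s) with
        | none => simp [hres'i]
        | some k =>
          simp only [Option.map_some, Option.some.injEq]
          push_cast
          ring

-- the enumerate entry with key s + k is (s + k, ws[k])
theorem pvEnumerate_find? (ws : List String) (s : Int) (k : Nat) (hk : k < ws.length) :
    (PySem.List.enumerate ws s).find? (fun p => p.1 == s + (k : Int)) = some (s + (k : Int), ws[k]) := by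
  induction ws generalizing s k with
  | nil => simp at hk
  | cons w ws ihw =>
    rw [PySem.List.enumerate_cons, List.find?_cons]
    cases k with
    | zero => simp
    | succ k =>
      have hne : (s == s + ((k + 1 : Nat) : Int)) = false := by
        simp only [beq_eq_false_iff_ne]
        push_cast
        omega
      rw [hne]
      have := ihw (s + 1) k (by simpa using Nat.lt_of_succ_lt_succ hk)
      rw [show s + 1 + (k : Int) = s + ((k + 1 : Nat) : Int) by push_cast; ring] at this
      simpa using this

-- enumerate keys are distinct
theorem pvEnumerate_nodup (ws : List String) (s : Int) :
    ((PySem.List.enumerate ws s).map Prod.fst).Nodup := by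
  have h := PySem.List.map_fst_enumerate ws s
  have h2 : (PySem.List.enumerate ws s).map Prod.fst
      = (PySem.List.enumerate ws s).map (fun x => x.1) := rfl
  rw [h2, h]
  exact PySem.List.nodup_pyRange_one s (s + ws.length)

-- B equals the reference map
theorem find_sentence_alt_eq_map (t_list : List String) (w_list : List String) :
    find_sentence_alt t_list w_list = w_list.map (pvSpecIdx t_list) := by
  unfold find_sentence_alt
  rw [PySem.List.len_eq, PySem.List.pyRange_zero_nat, List.map_map]
  apply List.ext_getElem
  · simp
  · intro k h1 h2
    simp only [List.getElem_map, List.getElem_range, Function.comp_apply]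
    have hk : k < w_list.length := by simpa using h1
    have hget := pvScanB_get? t_list 0 (PySem.List.enumerate w_list 0)
      PySem.Dict.empty (k : Int) (pvEnumerate_nodup w_list 0)
    have hfind := pvEnumerate_find? w_list 0 k hk
    rw [show (0 : Int) + (k : Int) = (k : Int) by ring] at hfind
    rw [hfind] at hget
    dsimp only at hget
    rw [PySem.Dict.getD_eq_get?_getD, hget]
    unfold pvSpecIdx
    cases hfi : t_list.findIdx? (fun s => PySem.Str.isIn w_list[k] s) with
    | none => simp [PySem.Dict.get?_empty]
    | some m => simp

-- ===== VERDICT (by name: the statement is the Claim_ definition above) =====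
theorem find_sentence_spec : Claim_equal_find_sentence := by
  intro t_list w_list _
  unfold Spec_find_sentence
  rw [find_sentence_eq_map, find_sentence_alt_eq_map]
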